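-- pv_equiv track=rewrite | github.com/PizzaTimeJoshua/ControllerMacroRunner | py_scripts/gen3_sid_from_tid.py | lcg_advance
-- ===== SOURCE A (Python) =====
-- A = 0x41C64E6D
--
-- C = 0x00006073
--
-- MASK32 = 0xFFFFFFFF
--
-- def lcg_advance(state: int, n: int) -> int:
--     """
--     Advance the Gen 3 LCRNG by n steps using fast exponentiation.
--     Returns the state after n steps.
--     """
--     if n < 0:
--         raise ValueError("n must be >= 0")
--
--     mul = A
--     add = C
--     acc_mul = 1
--     acc_add = 0
--
--     while n:
--         if n & 1:
--             # compose: acc(x) = acc_mul*x + acc_add; then apply T(x)=mul*x+add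
--             acc_mul = (acc_mul * mul) & MASK32
--             acc_add = (acc_add * mul + add) & MASK32
--
--         # square the transform: T(T(x)) = (mul^2)*x + add*(mul+1)
--         add = (add * ((mul + 1) & MASK32)) & MASK32
--         mul = (mul * mul) & MASK32
--         n >>= 1
--
--     return (acc_mul * state + acc_add) & MASK32
-- ===== SOURCE B (Python) =====
-- A = 0x41C64E6D
--
-- C = 0x00006073
--
-- MASK32 = 0xFFFFFFFF
--
-- _M = MASK32 + 1
--
--
-- def _pow_and_geom(n: int) -> tuple:
--     """Return (A**n mod 2**32, S(n) mod 2**32) where S(n) = 1 + A + ... + A**(n-1),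
--     by divide and conquer: S(2k) = S(k)*(1+A**k), S(2k+1) = 1 + A*S(2k)."""
--     if n == 0:
--         return (1, 0)
--     p, s = _pow_and_geom(n // 2)
--     p2 = (p * p) % _M
--     s2 = (s * (1 + p)) % _M
--     if n % 2:
--         return ((A * p2) % _M, (1 + A * s2) % _M)
--     return (p2, s2)
--
--
-- def lcg_advance(state: int, n: int) -> int:
--     """
--     Advance the Gen 3 LCRNG by n steps.
--     Returns the state after n steps.
--     """
--     if n < 0:
--         raise ValueError("n must be >= 0")
--     p, s = _pow_and_geom(n)
--     return (p * state + C * s) % _M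
-- ===== Notes on version B (the rewrite author's own statement) =====
-- stated objective: alternative
-- what changed: Replaces A's bottom-up binary loop that squares and composes affine maps (mul,add,acc_mul,acc_add) with a top-down divide-and-conquer on n computing the pair (A^n mod 2^32, geometric sum S(n) mod 2^32) from the recurrences S(2k)=S(k)*(1+A^k), S(2k+1)=1+A*S(2k), then returning (A^n*state + C*S(n)) mod 2^32.
import Mathlib
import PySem

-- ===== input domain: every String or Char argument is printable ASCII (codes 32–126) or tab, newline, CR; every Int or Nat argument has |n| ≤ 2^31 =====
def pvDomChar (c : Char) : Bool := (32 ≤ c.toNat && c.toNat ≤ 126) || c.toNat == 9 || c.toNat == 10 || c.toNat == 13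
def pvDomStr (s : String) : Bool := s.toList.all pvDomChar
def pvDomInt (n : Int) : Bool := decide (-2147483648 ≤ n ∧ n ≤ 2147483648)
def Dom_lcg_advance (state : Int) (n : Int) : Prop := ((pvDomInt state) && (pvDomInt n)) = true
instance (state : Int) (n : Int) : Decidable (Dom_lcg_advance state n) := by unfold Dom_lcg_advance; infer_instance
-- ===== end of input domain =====

-- A = B: A advances the Gen3 LCRNG with a binary loop composing affine maps; B computes
-- (A^n mod 2^32, geometric sum S(n) mod 2^32) by one top-down divide-and-conquer and
-- returns (A^n*state + C*S(n)) mod 2^32 — an alternative decomposition, same O(log n) cost.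


-- modulus 2^32; Python's `x & MASK32` (MASK32 = 2^32-1, nonnegative) equals `x mod 2^32`,
-- ported as Int.emod (= Python % for this positive modulus).
def pvM : Int := 4294967296
def pvA : Int := 0x41C64E6D
def pvC : Int := 0x00006073

-- ===== PORT A =====
-- the `while n:` loop of A over state (mul, add, acc_mul, acc_add), n halving each step
def lcgLoopA (mul add am aa : Int) (n : Nat) : Int × Int :=
  if h : n = 0 then (am, aa)
  else
    let am' := if n % 2 = 1 then (am * mul) % pvM else am
    let aa' := if n % 2 = 1 then (aa * mul + add) % pvM else aa
    lcgLoopA ((mul * mul) % pvM) ((add * ((mul + 1) % pvM)) % pvM) am' aa' (n / 2)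
  termination_by n
  decreasing_by exact Nat.div_lt_self (Nat.pos_of_ne_zero h) one_lt_two

def lcg_advance (state : Int) (n : Int) : Int :=
  -- n < 0 raises ValueError in A: excluded by Pre_; n.toNat is only used under 0 ≤ n
  let p := lcgLoopA pvA pvC 1 0 n.toNat
  (p.1 * state + p.2) % pvM

-- ===== PORT B =====
-- _pow_and_geom: divide and conquer, returns (A^n mod 2^32, S(n) mod 2^32)
def pvPowGeom (n : Nat) : Int × Int :=
  if h : n = 0 then (1, 0)
  else
    let ps := pvPowGeom (n / 2)
    let p2 := (ps.1 * ps.1) % pvM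
    let s2 := (ps.2 * (1 + ps.1)) % pvM
    if n % 2 = 1 then ((pvA * p2) % pvM, (1 + pvA * s2) % pvM) else (p2, s2)
  termination_by n
  decreasing_by exact Nat.div_lt_self (Nat.pos_of_ne_zero h) one_lt_two

def lcg_advance_alt (state : Int) (n : Int) : Int :=
  let ps := pvPowGeom n.toNat
  (ps.1 * state + pvC * ps.2) % pvM

-- ===== PRECONDITION & SPEC =====
-- A raises ValueError for n < 0 (and so does B): Pre_ admits exactly the inputs where A returns.
def Pre_lcg_advance (state : Int) (n : Int) : Prop := 0 ≤ n
instance (state : Int) (n : Int) : Decidable (Pre_lcg_advance state n) := by unfold Pre_lcg_advance; infer_instance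
def pvWitness_lcg_advance : Int × Int := (1234, 7)

def Spec_lcg_advance (state : Int) (n : Int) (out : Int) : Prop := out = lcg_advance_alt state n
instance (state : Int) (n : Int) (out : Int) : Decidable (Spec_lcg_advance state n out) := by unfold Spec_lcg_advance; infer_instance

-- ===== CLAIM (what is proved, stated in full; the proofs are below) =====
def Claim_equal_lcg_advance : Prop := ∀ (state : Int) (n : Int), Dom_lcg_advance state n → Pre_lcg_advance state n → Spec_lcg_advance state n (lcg_advance state n)

-- ===== LEMMAS AND PROOFS =====

-- exact geometric sum S(n) = 1 + x + ... + x^(n-1) over Int (the common reference)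
def pvG (x : Int) : Nat → Int
  | 0 => 0
  | n + 1 => pvG x n + x ^ n

theorem pvG_succ (x : Int) (n : Nat) : pvG x (n + 1) = pvG x n + x ^ n := rfl

theorem pvG_succ' (x : Int) (n : Nat) : pvG x (n + 1) = 1 + x * pvG x n := by
  induction n with
  | zero => simp [pvG]
  | succ k ih =>
    calc pvG x (k + 1 + 1) = pvG x (k + 1) + x ^ (k + 1) := pvG_succ x (k + 1)
      _ = (1 + x * pvG x k) + x ^ (k + 1) := by rw [ih]
      _ = 1 + x * (pvG x k + x ^ k) := by ring
      _ = 1 + x * pvG x (k + 1) := by rw [pvG_succ]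

theorem pvG_two_mul' (x : Int) (k : Nat) : pvG x (2 * k) = pvG x k * (1 + x ^ k) := by
  induction k with
  | zero => simp [pvG]
  | succ k ih =>
    have h : pvG x k + x ^ k = 1 + x * pvG x k := by
      rw [← pvG_succ, pvG_succ']
    calc pvG x (2 * (k + 1)) = pvG x ((2 * k + 1) + 1) := by ring_nf
      _ = pvG x (2 * k) + x ^ (2 * k) + x ^ (2 * k + 1) := by rw [pvG_succ, pvG_succ]
      _ = pvG x k * (1 + x ^ k) + x ^ (2 * k) + x ^ (2 * k + 1) := by rw [ih]
      _ = pvG x (k + 1) * (1 + x ^ (k + 1)) := by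
          rw [pvG_succ]; linear_combination (x ^ k : Int) * h

theorem pvG_two_mul (x : Int) (k : Nat) : pvG x (2 * k) = (x + 1) * pvG (x ^ 2) k := by
  induction k with
  | zero => simp [pvG]
  | succ k ih =>
    calc pvG x (2 * (k + 1)) = pvG x ((2 * k + 1) + 1) := by ring_nf
      _ = pvG x (2 * k) + x ^ (2 * k) + x ^ (2 * k + 1) := by rw [pvG_succ, pvG_succ]
      _ = (x + 1) * pvG (x ^ 2) k + x ^ (2 * k) + x ^ (2 * k + 1) := by rw [ih]
      _ = (x + 1) * pvG (x ^ 2) (k + 1) := by rw [pvG_succ]; ring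

theorem pvG_modeq {a b : Int} (h : a ≡ b [ZMOD pvM]) (n : Nat) : pvG a n ≡ pvG b n [ZMOD pvM] := by
  induction n with
  | zero => rfl
  | succ k ih => exact ih.add (h.pow k)

theorem pvMod_modeq (x : Int) : x % pvM ≡ x [ZMOD pvM] := Int.emod_emod_of_dvd x dvd_rfl

-- invariant of A's loop: the accumulated affine map is T^n ∘ acc₀, with T(x) = mul·x + add
theorem lcgLoopA_modeq (n : Nat) : ∀ mul add am aa : Int,
    (lcgLoopA mul add am aa n).1 ≡ am * mul ^ n [ZMOD pvM] ∧
    (lcgLoopA mul add am aa n).2 ≡ aa * mul ^ n + add * pvG mul n [ZMOD pvM] := by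
  induction n using Nat.strong_induction_on with
  | _ n ih =>
    intro mul add am aa
    rw [lcgLoopA]
    by_cases h0 : n = 0
    · subst h0; simp [pvG]
    · have hlt : n / 2 < n := Nat.div_lt_self (Nat.pos_of_ne_zero h0) one_lt_two
      simp only [h0, dif_neg, not_false_iff]
      set q := n / 2 with hq
      have hmul : (mul * mul) % pvM ≡ mul ^ 2 [ZMOD pvM] := by
        have := pvMod_modeq (mul * mul); simpa [sq] using this
      have hadd : (add * ((mul + 1) % pvM)) % pvM ≡ add * (mul + 1) [ZMOD pvM] :=
        (pvMod_modeq _).trans (Int.ModEq.mul_left add (pvMod_modeq _))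
      have hpow : ((mul * mul) % pvM) ^ q ≡ mul ^ (2 * q) [ZMOD pvM] := by
        calc ((mul * mul) % pvM) ^ q ≡ (mul ^ 2) ^ q [ZMOD pvM] := hmul.pow q
          _ = mul ^ (2 * q) := by rw [← pow_mul]
      have hG : pvG ((mul * mul) % pvM) q ≡ pvG (mul ^ 2) q [ZMOD pvM] := pvG_modeq hmul q
      by_cases hpar : n % 2 = 1
      · have hn : n = 2 * q + 1 := by omega
        simp only [hpar, if_pos]
        obtain ⟨ih1, ih2⟩ := ih q hlt ((mul * mul) % pvM) ((add * ((mul + 1) % pvM)) % pvM)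
          ((am * mul) % pvM) ((aa * mul + add) % pvM)
        constructor
        · calc (lcgLoopA _ _ _ _ q).1
              ≡ ((am * mul) % pvM) * ((mul * mul) % pvM) ^ q [ZMOD pvM] := ih1
            _ ≡ (am * mul) * mul ^ (2 * q) [ZMOD pvM] := (pvMod_modeq _).mul hpow
            _ = am * mul ^ n := by rw [hn, pow_succ]; ring
        · calc (lcgLoopA _ _ _ _ q).2
              ≡ ((aa * mul + add) % pvM) * ((mul * mul) % pvM) ^ q
                + ((add * ((mul + 1) % pvM)) % pvM) * pvG ((mul * mul) % pvM) q [ZMOD pvM] := ih2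
            _ ≡ (aa * mul + add) * mul ^ (2 * q) + (add * (mul + 1)) * pvG (mul ^ 2) q [ZMOD pvM] :=
                ((pvMod_modeq _).mul hpow).add (hadd.mul hG)
            _ = aa * mul ^ n + add * pvG mul n := by
                rw [hn, show 2 * q + 1 = (2 * q) + 1 from rfl, pvG_succ, pvG_two_mul, pow_succ]
                ring
      · have hpar0 : n % 2 = 0 := by omega
        have hn : n = 2 * q := by omega
        simp only [hpar, if_neg, not_false_iff]
        obtain ⟨ih1, ih2⟩ := ih q hlt ((mul * mul) % pvM) ((add * ((mul + 1) % pvM)) % pvM) am aa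
        constructor
        · calc (lcgLoopA _ _ _ _ q).1
              ≡ am * ((mul * mul) % pvM) ^ q [ZMOD pvM] := ih1
            _ ≡ am * mul ^ (2 * q) [ZMOD pvM] := Int.ModEq.mul_left am hpow
            _ = am * mul ^ n := by rw [hn]
        · calc (lcgLoopA _ _ _ _ q).2
              ≡ aa * ((mul * mul) % pvM) ^ q
                + ((add * ((mul + 1) % pvM)) % pvM) * pvG ((mul * mul) % pvM) q [ZMOD pvM] := ih2
            _ ≡ aa * mul ^ (2 * q) + (add * (mul + 1)) * pvG (mul ^ 2) q [ZMOD pvM] :=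
                (Int.ModEq.mul_left aa hpow).add (hadd.mul hG)
            _ = aa * mul ^ n + add * pvG mul n := by rw [hn, pvG_two_mul]; ring

-- invariant of B's divide and conquer: pvPowGeom n ≡ (A^n, S(n)) componentwise
theorem pvPowGeom_modeq (n : Nat) :
    (pvPowGeom n).1 ≡ pvA ^ n [ZMOD pvM] ∧ (pvPowGeom n).2 ≡ pvG pvA n [ZMOD pvM] := by
  induction n using Nat.strong_induction_on with
  | _ n ih =>
    rw [pvPowGeom]
    by_cases h0 : n = 0
    · subst h0; simp [pvG]
    · have hlt : n / 2 < n := Nat.div_lt_self (Nat.pos_of_ne_zero h0) one_lt_two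
      simp only [h0, dif_neg, not_false_iff]
      set q := n / 2 with hq
      obtain ⟨ihp, ihs⟩ := ih q hlt
      have hp2 : ((pvPowGeom q).1 * (pvPowGeom q).1) % pvM ≡ pvA ^ (2 * q) [ZMOD pvM] := by
        calc ((pvPowGeom q).1 * (pvPowGeom q).1) % pvM
            ≡ (pvPowGeom q).1 * (pvPowGeom q).1 [ZMOD pvM] := pvMod_modeq _
          _ ≡ pvA ^ q * pvA ^ q [ZMOD pvM] := ihp.mul ihp
          _ = pvA ^ (2 * q) := by rw [two_mul, pow_add]
      have hs2 : ((pvPowGeom q).2 * (1 + (pvPowGeom q).1)) % pvM ≡ pvG pvA (2 * q) [ZMOD pvM] := by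
        calc ((pvPowGeom q).2 * (1 + (pvPowGeom q).1)) % pvM
            ≡ (pvPowGeom q).2 * (1 + (pvPowGeom q).1) [ZMOD pvM] := pvMod_modeq _
          _ ≡ pvG pvA q * (1 + pvA ^ q) [ZMOD pvM] := ihs.mul ((Int.ModEq.refl 1).add ihp)
          _ = pvG pvA (2 * q) := (pvG_two_mul' pvA q).symm
      by_cases hpar : n % 2 = 1
      · have hn : n = 2 * q + 1 := by omega
        simp only [hpar, if_pos]
        constructor
        · calc (pvA * (((pvPowGeom q).1 * (pvPowGeom q).1) % pvM)) % pvM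
              ≡ pvA * (pvA ^ (2 * q)) [ZMOD pvM] := (pvMod_modeq _).trans (Int.ModEq.mul_left pvA hp2)
            _ = pvA ^ n := by rw [hn, pow_succ]; ring
        · calc (1 + pvA * (((pvPowGeom q).2 * (1 + (pvPowGeom q).1)) % pvM)) % pvM
              ≡ 1 + pvA * pvG pvA (2 * q) [ZMOD pvM] :=
                (pvMod_modeq _).trans ((Int.ModEq.refl 1).add (Int.ModEq.mul_left pvA hs2))
            _ = pvG pvA n := by rw [hn, pvG_succ']
      · have hn : n = 2 * q := by omega
        simp only [hpar, if_neg, not_false_iff]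
        refine ⟨?_, ?_⟩
        · rw [show (pvA : Int) ^ n = pvA ^ (2 * q) from by rw [hn]]; exact hp2
        · rw [show pvG pvA n = pvG pvA (2 * q) from by rw [hn]]; exact hs2

-- ===== VERDICT (by name: the statement is the Claim_ definition above) =====
theorem lcg_advance_spec : Claim_equal_lcg_advance := by
  intro state n _hDom _hPre
  unfold Spec_lcg_advance lcg_advance lcg_advance_alt
  obtain ⟨hA1, hA2⟩ := lcgLoopA_modeq n.toNat pvA pvC 1 0
  obtain ⟨hB1, hB2⟩ := pvPowGeom_modeq n.toNat
  have hA1' : (lcgLoopA pvA pvC 1 0 n.toNat).1 ≡ pvA ^ n.toNat [ZMOD pvM] := by simpa using hA1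
  have hA2' : (lcgLoopA pvA pvC 1 0 n.toNat).2 ≡ pvC * pvG pvA n.toNat [ZMOD pvM] := by simpa using hA2
  have h : (lcgLoopA pvA pvC 1 0 n.toNat).1 * state + (lcgLoopA pvA pvC 1 0 n.toNat).2
      ≡ (pvPowGeom n.toNat).1 * state + pvC * (pvPowGeom n.toNat).2 [ZMOD pvM] :=
    ((hA1'.trans hB1.symm).mul_right state).add (hA2'.trans (Int.ModEq.mul_left pvC hB2.symm))
  exact h
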